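-- pv_equiv track=rewrite | github.com/SEUAUTO2025/SEMA | Experiments/Comparation/batch_run_eval_text_choose_judge.py | _build_resume_rows
-- ===== SOURCE A (Python) =====
-- from typing import Any, Dict, List, Optional, Tuple, Union
--
-- def _build_resume_rows(
--     input_rows: List[Dict[str, Any]],
--     sample_name_column: str,
--     selection_fieldnames: List[str],
--     empty_selection_fields: Dict[str, str],
--     existing_output_rows: List[Dict[str, Any]],
-- ) -> List[Dict[str, Any]]:
--     existing_by_sample = {}
--     for existing_row in existing_output_rows:
--         sample_name = str(existing_row.get(sample_name_column) or "").strip()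
--         if sample_name:
--             existing_by_sample[sample_name] = dict(existing_row)
--
--     merged_rows = []
--     for input_row in input_rows:
--         sample_name = str(input_row.get(sample_name_column) or "").strip()
--         merged_row = dict(input_row)
--         merged_row.update(dict(empty_selection_fields))
--         existing_row = existing_by_sample.get(sample_name)
--         if existing_row:
--             for field_name in selection_fieldnames:
--                 existing_value = existing_row.get(field_name)
--                 if str(existing_value or "").strip():
--                     merged_row[field_name] = existing_value
--         merged_rows.append(merged_row)
--     return merged_rows
-- ===== SOURCE B (Python) =====
-- def _build_resume_rows(
--     input_rows,
--     sample_name_column,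
--     selection_fieldnames,
--     empty_selection_fields,
--     existing_output_rows,
-- ):
--     def norm(value):
--         return str(value or "").strip()
--
--     merged_rows = []
--     for input_row in input_rows:
--         sample_name = norm(input_row.get(sample_name_column))
--         merged_row = dict(input_row)
--         merged_row.update(dict(empty_selection_fields))
--         if sample_name:
--             # last-wins: scan existing rows in reverse, take the first match
--             for existing_row in reversed(existing_output_rows):
--                 if norm(existing_row.get(sample_name_column)) == sample_name:
--                     for field_name in selection_fieldnames:
--                         existing_value = existing_row.get(field_name)
--                         if norm(existing_value):
--                             merged_row[field_name] = existing_value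
--                     break
--         merged_rows.append(merged_row)
--     return merged_rows
-- ===== Notes on version B (the rewrite author's own statement) =====
-- stated objective: alternative
-- what changed: Replaces the precomputed last-wins index dict over existing_output_rows with, per input row, a reverse linear scan taking the first row whose normalized sample name matches.
import Mathlib
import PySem

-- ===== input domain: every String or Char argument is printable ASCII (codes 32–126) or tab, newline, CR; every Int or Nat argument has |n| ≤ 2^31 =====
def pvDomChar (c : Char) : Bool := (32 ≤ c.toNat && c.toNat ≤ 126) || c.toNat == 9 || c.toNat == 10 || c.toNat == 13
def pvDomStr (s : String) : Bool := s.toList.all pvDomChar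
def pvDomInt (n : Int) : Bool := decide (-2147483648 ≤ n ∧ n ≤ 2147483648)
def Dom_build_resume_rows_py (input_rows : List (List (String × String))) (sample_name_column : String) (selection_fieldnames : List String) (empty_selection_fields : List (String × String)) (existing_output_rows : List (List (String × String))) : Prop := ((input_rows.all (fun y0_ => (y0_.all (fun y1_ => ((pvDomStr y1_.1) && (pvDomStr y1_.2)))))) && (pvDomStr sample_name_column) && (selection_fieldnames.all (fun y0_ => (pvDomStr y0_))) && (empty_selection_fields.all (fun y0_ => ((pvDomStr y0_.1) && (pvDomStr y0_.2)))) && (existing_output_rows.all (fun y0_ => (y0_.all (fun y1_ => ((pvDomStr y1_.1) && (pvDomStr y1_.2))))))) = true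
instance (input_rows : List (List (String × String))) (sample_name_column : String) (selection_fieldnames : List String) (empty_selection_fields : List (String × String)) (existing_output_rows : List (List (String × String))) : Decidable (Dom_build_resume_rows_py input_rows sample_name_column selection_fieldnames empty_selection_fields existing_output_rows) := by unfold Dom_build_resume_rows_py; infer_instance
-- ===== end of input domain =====

-- ===== PORT A =====
-- B replaces A's precomputed last-wins index over existing_output_rows by a per-row
-- reverse scan for the first matching normalized sample name (alternative decomposition).

-- str(x or "").strip() on an optional string (exact: str of a string is itself; "" is falsy)
def pvNorm (o : Option String) : String :=
  PySem.Str.strip (match o with | none => "" | some s => s)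

-- dict(input_row) then .update(dict(empty_selection_fields))
def pvMergeBase (row : List (String × String)) (empty_selection_fields : List (String × String)) :
    PySem.Dict String String :=
  (PySem.Dict.mk row).update empty_selection_fields

-- the inner 'for field_name in selection_fieldnames' copy loop, shared verbatim by A and B in Python
def pvApplySel (selection_fieldnames : List String) (existing_row : List (String × String))
    (merged : PySem.Dict String String) : PySem.Dict String String :=
  selection_fieldnames.foldl (fun m f =>
    let ev := (PySem.Dict.mk existing_row).get? f
    if pvNorm ev ≠ "" then m.insert f (ev.getD "") else m) merged

-- A's first loop: existing_by_sample
def pvIndexA (sample_name_column : String) (existing_output_rows : List (List (String × String))) :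
    PySem.Dict String (List (String × String)) :=
  existing_output_rows.foldl (fun d r =>
    let name := pvNorm ((PySem.Dict.mk r).get? sample_name_column)
    if name ≠ "" then d.insert name r else d) PySem.Dict.empty

def build_resume_rows_py (input_rows : List (List (String × String))) (sample_name_column : String) (selection_fieldnames : List String) (empty_selection_fields : List (String × String)) (existing_output_rows : List (List (String × String))) : List (List (String × String)) :=
  let idx := pvIndexA sample_name_column existing_output_rows
  input_rows.map (fun input_row =>
    let sample_name := pvNorm ((PySem.Dict.mk input_row).get? sample_name_column)
    let merged := pvMergeBase input_row empty_selection_fields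
    (match idx.get? sample_name with
     | some existing_row =>
         -- 'if existing_row:' — a dict is truthy iff nonempty
         if existing_row ≠ [] then pvApplySel selection_fieldnames existing_row merged else merged
     | none => merged).items)

-- ===== PORT B =====
def build_resume_rows_py_alt (input_rows : List (List (String × String))) (sample_name_column : String) (selection_fieldnames : List String) (empty_selection_fields : List (String × String)) (existing_output_rows : List (List (String × String))) : List (List (String × String)) :=
  input_rows.map (fun input_row =>
    let sample_name := pvNorm ((PySem.Dict.mk input_row).get? sample_name_column)
    let merged := pvMergeBase input_row empty_selection_fields
    (if sample_name ≠ "" then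
       match existing_output_rows.reverse.find?
           (fun r => pvNorm ((PySem.Dict.mk r).get? sample_name_column) == sample_name) with
       | some existing_row => pvApplySel selection_fieldnames existing_row merged
       | none => merged
     else merged).items)

-- ===== PRECONDITION & SPEC =====
def Spec_build_resume_rows_py (input_rows : List (List (String × String))) (sample_name_column : String) (selection_fieldnames : List String) (empty_selection_fields : List (String × String)) (existing_output_rows : List (List (String × String))) (out : List (List (String × String))) : Prop := out = build_resume_rows_py_alt input_rows sample_name_column selection_fieldnames empty_selection_fields existing_output_rows
instance (input_rows : List (List (String × String))) (sample_name_column : String) (selection_fieldnames : List String) (empty_selection_fields : List (String × String)) (existing_output_rows : List (List (String × String))) (out : List (List (String × String))) : Decidable (Spec_build_resume_rows_py input_rows sample_name_column selection_fieldnames empty_selection_fields existing_output_rows out) := by unfold Spec_build_resume_rows_py; infer_instance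

-- ===== CLAIM (what is proved, stated in full; the proofs are below) =====
def Claim_equal_build_resume_rows_py : Prop := ∀ (input_rows : List (List (String × String))) (sample_name_column : String) (selection_fieldnames : List String) (empty_selection_fields : List (String × String)) (existing_output_rows : List (List (String × String))), Dom_build_resume_rows_py input_rows sample_name_column selection_fieldnames empty_selection_fields existing_output_rows → Spec_build_resume_rows_py input_rows sample_name_column selection_fieldnames empty_selection_fields existing_output_rows (build_resume_rows_py input_rows sample_name_column selection_fieldnames empty_selection_fields existing_output_rows)

-- ===== LEMMAS AND PROOFS =====


-- key fact: A's index lookup at a nonempty name is B's reverse-scan first match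
theorem pvIndexA_get? (col name : String) (rows : List (List (String × String))) (h : name ≠ "") :
    (pvIndexA col rows).get? name
      = rows.reverse.find? (fun r => pvNorm ((PySem.Dict.mk r).get? col) == name) := by
  induction rows using List.reverseRecOn with
  | nil => rfl
  | append_singleton rs r ih =>
      have hfold : pvIndexA col (rs ++ [r])
          = (if pvNorm ((PySem.Dict.mk r).get? col) ≠ "" then
               (pvIndexA col rs).insert (pvNorm ((PySem.Dict.mk r).get? col)) r
             else pvIndexA col rs) := by
        simp only [pvIndexA, List.foldl_append, List.foldl_cons, List.foldl_nil]
      rw [hfold]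
      have hrev : (rs ++ [r]).reverse = r :: rs.reverse := by
        simp
      rw [hrev, List.find?_cons]
      by_cases hm : pvNorm ((PySem.Dict.mk r).get? col) = name
      · rw [if_pos (by rw [hm]; exact h)]
        rw [show (pvNorm ((PySem.Dict.mk r).get? col) == name) = true from by simp [hm]]
        rw [hm, PySem.Dict.get?_insert_self]
      · rw [show (pvNorm ((PySem.Dict.mk r).get? col) == name) = false from by simp [hm]]
        by_cases hne : pvNorm ((PySem.Dict.mk r).get? col) = ""
        · rw [if_neg (by simp [hne])]
          exact ih
        · rw [if_pos hne,
            PySem.Dict.get?_insert_of_ne (pvIndexA col rs) r (fun hc => hm hc.symm)]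
          exact ih

-- A's index never contains the empty name
theorem pvIndexA_get?_empty (col : String) (rows : List (List (String × String))) :
    (pvIndexA col rows).get? "" = none := by
  induction rows using List.reverseRecOn with
  | nil => rfl
  | append_singleton rs r ih =>
      have hfold : pvIndexA col (rs ++ [r])
          = (if pvNorm ((PySem.Dict.mk r).get? col) ≠ "" then
               (pvIndexA col rs).insert (pvNorm ((PySem.Dict.mk r).get? col)) r
             else pvIndexA col rs) := by
        simp only [pvIndexA, List.foldl_append, List.foldl_cons, List.foldl_nil]
      rw [hfold]
      by_cases hne : pvNorm ((PySem.Dict.mk r).get? col) = ""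
      · rw [if_neg (by simp [hne])]; exact ih
      · rw [if_pos hne, PySem.Dict.get?_insert_of_ne (pvIndexA col rs) r (Ne.symm hne)]
        exact ih

-- a row matched by B's scan is nonempty (its sample column holds a value)
theorem pvMatch_ne_nil (col name : String) (h : name ≠ "") (r : List (String × String))
    (hm : pvNorm ((PySem.Dict.mk r).get? col) = name) : r ≠ [] := by
  intro hnil
  subst hnil
  exact h (hm ▸ rfl)

-- ===== VERDICT (by name: the statement is the Claim_ definition above) =====
theorem build_resume_rows_py_spec : Claim_equal_build_resume_rows_py := by
  intro input_rows col sel empty rows _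
  unfold Spec_build_resume_rows_py build_resume_rows_py build_resume_rows_py_alt
  refine List.map_congr_left (fun row _ => ?_)
  by_cases h : pvNorm ((PySem.Dict.mk row).get? col) = ""
  · simp [h, pvIndexA_get?_empty]
  · have hidx := pvIndexA_get? col (pvNorm ((PySem.Dict.mk row).get? col)) rows h
    cases hf : rows.reverse.find? (fun r => pvNorm ((PySem.Dict.mk r).get? col)
        == pvNorm ((PySem.Dict.mk row).get? col)) with
    | none => simp [h, hidx, hf]
    | some er =>
        have hm : pvNorm ((PySem.Dict.mk er).get? col) = pvNorm ((PySem.Dict.mk row).get? col) := by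
          simpa using List.find?_some hf
        simp [h, hidx, hf, pvMatch_ne_nil col _ h er hm]
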